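-- pv_equiv track=rewrite | github.com/specify/specify7 | specifyweb/backend/batch_identify/views.py | _parse_catalog_number_ranges
-- ===== SOURCE A (Python) =====
-- from collections.abc import Iterable
-- from typing import Any, Literal
--
-- CatalogToken = int | Literal['-']
--
-- def _tokenize_catalog_entry(entry: str) -> list[CatalogToken]:
--     tokens: list[CatalogToken] = []
--     current_number: list[str] = []
--
--     for character in entry:
--         if character.isdigit():
--             current_number.append(character)
--             continue
--
--         if len(current_number) > 0:
--             tokens.append(int(''.join(current_number)))
--             current_number = []
--
--         if character == '-':
--             tokens.append('-')
--
--     if len(current_number) > 0: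
--         tokens.append(int(''.join(current_number)))
--
--     return tokens
--
-- def _parse_catalog_number_ranges(entries: Iterable[str]) -> list[tuple[int, int]]:
--     ranges: list[tuple[int, int]] = []
--
--     for raw_entry in entries:
--         entry = raw_entry.strip()
--         if entry == '':
--             continue
--
--         tokens = _tokenize_catalog_entry(entry)
--         if not any(isinstance(token, int) for token in tokens):
--             continue
--
--         index = 0
--         while index < len(tokens):
--             token = tokens[index]
--             if token == '-':
--                 index += 1
--                 continue
--
--             start = token
--             end = start
--             if (
--                 index + 2 < len(tokens)
--                 and tokens[index + 1] == '-'
--                 and isinstance(tokens[index + 2], int)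
--             ):
--                 end = tokens[index + 2]
--                 index += 3
--             else:
--                 index += 1
--
--             if start > end:
--                 start, end = end, start
--             ranges.append((start, end))
--
--     if len(ranges) == 0:
--         raise ValueError('Provide at least one catalog number.')
--
--     return ranges
-- ===== SOURCE B (Python) =====
-- # Single-pass character scanner: no intermediate token list; digits are accumulated
-- # into an int directly and a tiny (pending start, dash-seen) state emits ranges.
-- def _parse_catalog_number_ranges(entries):
--     ranges = []
--     for entry in entries:
--         pending = None
--         dash_seen = False
--         current = None
--         for ch in entry:
--             if '0' <= ch <= '9':
--                 current = (current if current is not None else 0) * 10 + (ord(ch) - 48)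
--                 continue
--             if current is not None:
--                 pending, dash_seen = _emit_number(ranges, pending, dash_seen, current)
--                 current = None
--             if ch == '-' and pending is not None:
--                 if dash_seen:
--                     ranges.append((pending, pending))
--                     pending, dash_seen = None, False
--                 else:
--                     dash_seen = True
--         if current is not None:
--             pending, dash_seen = _emit_number(ranges, pending, dash_seen, current)
--         if pending is not None:
--             ranges.append((pending, pending))
--     if not ranges:
--         raise ValueError('Provide at least one catalog number.')
--     return ranges
--
-- def _emit_number(ranges, pending, dash_seen, n):
--     if pending is None:
--         return n, False
--     if dash_seen:
--         ranges.append((n, pending) if pending > n else (pending, n))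
--         return None, False
--     ranges.append((pending, pending))
--     return n, False
-- ===== Notes on version B (the rewrite author's own statement) =====
-- stated objective: alternative
-- what changed: B replaces A's two-phase tokenize-then-index-while-loop with a single character-by-character scan per entry that accumulates digit values directly and keeps only a (pending start, dash-seen) state, building no intermediate token list and needing no strip or token-class checks.
import Mathlib
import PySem

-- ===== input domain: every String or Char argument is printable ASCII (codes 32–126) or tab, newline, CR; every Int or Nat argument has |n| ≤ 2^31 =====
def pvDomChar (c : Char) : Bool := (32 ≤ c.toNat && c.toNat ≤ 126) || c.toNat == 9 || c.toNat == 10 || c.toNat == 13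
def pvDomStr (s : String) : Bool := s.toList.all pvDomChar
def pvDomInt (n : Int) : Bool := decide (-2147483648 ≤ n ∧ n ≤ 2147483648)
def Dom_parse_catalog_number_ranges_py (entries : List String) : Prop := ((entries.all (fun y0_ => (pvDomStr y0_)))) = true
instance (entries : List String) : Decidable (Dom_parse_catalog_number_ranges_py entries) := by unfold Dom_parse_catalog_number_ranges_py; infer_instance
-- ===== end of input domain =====

-- B replaces A's tokenize-then-index-loop by a single per-entry character scan with a
-- (pending start, dash-seen) state and direct digit accumulation (alternative decomposition, same cost).


-- ===== PORT A =====
inductive Tok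
  | num (n : Int)
  | dash
  deriving DecidableEq, Repr

-- int(''.join(cur)): exact for the nonempty all-digit buffers A ever flushes
def pvDigits (cs : List Char) : Int := cs.foldl (fun a c => a * 10 + ((c.toNat : Int) - 48)) 0

def flushTok (b : List Char) : List Tok :=
  if b.isEmpty then [] else [Tok.num (pvDigits b)]

-- _tokenize_catalog_entry's loop: buffer of digit chars, flushed on any non-digit and at the end
def tokenizeAux : List Char → List Char → List Tok
  | b, [] => flushTok b
  | b, c :: rest =>
      if PySem.Chars.isdigit c then tokenizeAux (b ++ [c]) rest
      else flushTok b ++ (if c = '-' then [Tok.dash] else []) ++ tokenizeAux [] rest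

def isNumTok : Tok → Bool
  | Tok.num _ => true
  | Tok.dash => false

-- the while-loop over tokens (index only ever advances: recursion on the remaining suffix)
def parseTokens : List Tok → List (Int × Int)
  | [] => []
  | Tok.dash :: rest => parseTokens rest
  | Tok.num s :: Tok.dash :: Tok.num e :: rest =>
      (if s > e then (e, s) else (s, e)) :: parseTokens rest
  | Tok.num s :: rest => (s, s) :: parseTokens rest

def parse_catalog_number_ranges_py (entries : List String) : List (Int × Int) :=
  entries.foldl (fun ranges raw =>
    let entry := PySem.Str.strip raw
    if entry = "" then ranges
    else
      let tokens := tokenizeAux [] entry.toList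
      if (tokens.any isNumTok) = false then ranges
      else ranges ++ parseTokens tokens) []

-- ===== PORT B =====
-- state: (ranges so far, pending start, dash seen since pending)
def BSt : Type := List (Int × Int) × Option Int × Bool

def stepNum : BSt → Int → BSt
  | (out, some p, true), n => (out ++ [if p > n then (n, p) else (p, n)], none, false)
  | (out, some p, false), n => (out ++ [(p, p)], some n, false)
  | (out, none, _), n => (out, some n, false)

def stepDash : BSt → BSt
  | (out, some p, true) => (out ++ [(p, p)], none, false)
  | (out, some p, false) => (out, some p, true)
  | (out, none, d) => (out, none, d)

def flushCur (st : BSt) : Option Int → BSt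
  | some n => stepNum st n
  | none => st

def endEntry : BSt → List (Int × Int)
  | (out, some p, _) => out ++ [(p, p)]
  | (out, none, _) => out

def scanAux (st : BSt) (cur : Option Int) : List Char → List (Int × Int)
  | [] => endEntry (flushCur st cur)
  | c :: rest =>
      if PySem.Chars.isdigit c then
        scanAux st (some ((cur.getD 0) * 10 + ((c.toNat : Int) - 48))) rest
      else
        let st' := flushCur st cur
        scanAux (if c = '-' then stepDash st' else st') none rest

def parse_catalog_number_ranges_py_alt (entries : List String) : List (Int × Int) :=
  entries.foldl (fun out raw => scanAux (out, none, false) none raw.toList) []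

-- ===== PRECONDITION & SPEC =====
-- A raises ValueError when no entry contains a digit (no range can be produced); excluded.
def Pre_parse_catalog_number_ranges_py (entries : List String) : Prop :=
  (entries.any (fun s => s.toList.any PySem.Chars.isdigit)) = true
instance (entries : List String) : Decidable (Pre_parse_catalog_number_ranges_py entries) := by
  unfold Pre_parse_catalog_number_ranges_py; infer_instance

def pvWitness_parse_catalog_number_ranges_py : List String := (["1-3", " 7 "])

def Spec_parse_catalog_number_ranges_py (entries : List String) (out : List (Int × Int)) : Prop :=
  out = parse_catalog_number_ranges_py_alt entries
instance (entries : List String) (out : List (Int × Int)) : Decidable (Spec_parse_catalog_number_ranges_py entries out) := by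
  unfold Spec_parse_catalog_number_ranges_py; infer_instance

-- ===== CLAIM (what is proved, stated in full; the proofs are below) =====
def Claim_equal_parse_catalog_number_ranges_py : Prop := ∀ (entries : List String), Dom_parse_catalog_number_ranges_py entries → Pre_parse_catalog_number_ranges_py entries → Spec_parse_catalog_number_ranges_py entries (parse_catalog_number_ranges_py entries)

-- ===== LEMMAS AND PROOFS =====

-- token-level runner of B's state machine (proof device)
def runToks (st : BSt) : List Tok → List (Int × Int)
  | [] => endEntry st
  | Tok.num n :: r => runToks (stepNum st n) r
  | Tok.dash :: r => runToks (stepDash st) r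

lemma runToks_eq_parseTokens (t : List Tok) :
    ∀ out : List (Int × Int),
      (runToks (out, none, false) t = out ++ parseTokens t) ∧
      (∀ p, runToks (out, some p, false) t = out ++ parseTokens (Tok.num p :: t)) ∧
      (∀ p, runToks (out, some p, true) t = out ++ parseTokens (Tok.num p :: Tok.dash :: t)) := by
  induction t with
  | nil =>
    intro out
    refine ⟨?_, ?_, ?_⟩ <;> simp [runToks, endEntry, parseTokens]
  | cons c t ih =>
    intro out
    cases c with
    | num n =>
      refine ⟨?_, ?_, ?_⟩
      · simpa [runToks, stepNum] using (ih out).2.1 n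
      · intro p
        have := (ih (out ++ [(p, p)])).2.1 n
        simp [runToks, stepNum, parseTokens, this]
      · intro p
        have := (ih (out ++ [if p > n then (n, p) else (p, n)])).1
        simp [runToks, stepNum, parseTokens, this]
    | dash =>
      refine ⟨?_, ?_, ?_⟩
      · simpa [runToks, stepDash, parseTokens] using (ih out).1
      · intro p
        simpa [runToks, stepDash] using (ih out).2.2 p
      · intro p
        have := (ih (out ++ [(p, p)])).1
        simp [runToks, stepDash, parseTokens, this]

-- buffer value correspondence
def optOf (b : List Char) : Option Int := if b.isEmpty then none else some (pvDigits b)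

lemma scanAux_eq_runToks (chars : List Char) :
    ∀ (b : List Char) (st : BSt), scanAux st (optOf b) chars = runToks st (tokenizeAux b chars) := by
  induction chars with
  | nil =>
    intro b st
    cases b with
    | nil => simp [scanAux, tokenizeAux, flushTok, optOf, flushCur, runToks]
    | cons x xs =>
      simp [scanAux, tokenizeAux, flushTok, optOf, flushCur, runToks]
  | cons c rest ih =>
    intro b st
    by_cases hd : PySem.Chars.isdigit c = true
    · have h1 : optOf (b ++ [c]) = some ((optOf b).getD 0 * 10 + ((c.toNat : Int) - 48)) := by
        cases b <;> simp [optOf, pvDigits]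
      have := ih (b ++ [c]) st
      rw [h1] at this
      simp [scanAux, tokenizeAux, hd, this]
    · by_cases hdash : c = '-'
      · cases b with
        | nil =>
          simpa [scanAux, tokenizeAux, hd, hdash, flushTok, optOf, flushCur, runToks]
            using ih [] (stepDash st)
        | cons x xs =>
          simpa [scanAux, tokenizeAux, hd, hdash, flushTok, optOf, flushCur, runToks]
            using ih [] (stepDash (stepNum st (pvDigits (x :: xs))))
      · cases b with
        | nil =>
          simpa [scanAux, tokenizeAux, hd, hdash, flushTok, optOf, flushCur, runToks]
            using ih [] st
        | cons x xs =>
          simpa [scanAux, tokenizeAux, hd, hdash, flushTok, optOf, flushCur, runToks]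
            using ih [] (stepNum st (pvDigits (x :: xs)))

lemma isspace_not_digit (c : Char) (h : PySem.Chars.isspace c = true) :
    PySem.Chars.isdigit c = false := by
  simp [PySem.Chars.isspace] at h
  simp [PySem.Chars.isdigit, Char.le_def, UInt32.le_iff_toNat_le]
  intro h0
  omega

lemma isspace_ne_dash (c : Char) (h : PySem.Chars.isspace c = true) : c ≠ '-' := by
  intro hc; subst hc; simp [PySem.Chars.isspace] at h

lemma tokenizeAux_all_space (ws : List Char) (h : ws.all PySem.Chars.isspace = true) :
    ∀ b, tokenizeAux b ws = flushTok b := by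
  induction ws with
  | nil => intro b; simp [tokenizeAux]
  | cons w ws ih =>
    intro b
    simp only [List.all_cons, Bool.and_eq_true] at h
    simp [tokenizeAux, isspace_not_digit w h.1, isspace_ne_dash w h.1, ih h.2, flushTok]

lemma tokenizeAux_append_space (xs ws : List Char) (h : ws.all PySem.Chars.isspace = true) :
    ∀ b, tokenizeAux b (xs ++ ws) = tokenizeAux b xs := by
  induction xs with
  | nil => intro b; simpa [tokenizeAux] using tokenizeAux_all_space ws h b
  | cons c xs ih =>
    intro b
    by_cases hd : PySem.Chars.isdigit c = true
    · simp [tokenizeAux, hd, ih]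
    · simp [tokenizeAux, hd, ih]

lemma tokenizeAux_lstrip (l : List Char) :
    tokenizeAux [] (l.dropWhile PySem.Chars.isspace) = tokenizeAux [] l := by
  induction l with
  | nil => rfl
  | cons c t ih =>
    by_cases hs : PySem.Chars.isspace c = true
    · simp [hs, tokenizeAux, isspace_not_digit c hs,
        isspace_ne_dash c hs, flushTok, ih]
    · simp [hs]

lemma tokenize_strip (l : List Char) :
    tokenizeAux [] (PySem.Chars.strip l) = tokenizeAux [] l := by
  unfold PySem.Chars.strip PySem.Chars.rstrip
  set m := PySem.Chars.lstrip l with hm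
  have hdecomp : (List.dropWhile PySem.Chars.isspace m.reverse).reverse ++
      (List.takeWhile PySem.Chars.isspace m.reverse).reverse = m := by
    rw [← List.reverse_append, List.takeWhile_append_dropWhile, List.reverse_reverse]
  have hws : ((List.takeWhile PySem.Chars.isspace m.reverse).reverse).all
      PySem.Chars.isspace = true := by
    rw [List.all_eq_true]
    intro c hc
    rw [List.mem_reverse] at hc
    exact List.mem_takeWhile_imp hc
  calc tokenizeAux [] (List.dropWhile PySem.Chars.isspace m.reverse).reverse
      = tokenizeAux [] ((List.dropWhile PySem.Chars.isspace m.reverse).reverse ++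
          (List.takeWhile PySem.Chars.isspace m.reverse).reverse) :=
        (tokenizeAux_append_space _ _ hws []).symm
    _ = tokenizeAux [] m := by rw [hdecomp]
    _ = tokenizeAux [] l := by rw [hm]; exact tokenizeAux_lstrip l

lemma parseTokens_no_num (t : List Tok) (h : t.any isNumTok = false) : parseTokens t = [] := by
  induction t with
  | nil => rfl
  | cons c t ih =>
    cases c with
    | num n => simp [isNumTok] at h
    | dash =>
      simp only [List.any_cons, isNumTok, Bool.false_or] at h
      simp [parseTokens, ih h]

lemma stepA_eq (ranges : List (Int × Int)) (raw : String) :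
    (let entry := PySem.Str.strip raw;
     if entry = "" then ranges
     else
       let tokens := tokenizeAux [] entry.toList
       if (tokens.any isNumTok) = false then ranges
       else ranges ++ parseTokens tokens) =
    ranges ++ parseTokens (tokenizeAux [] raw.toList) := by
  have htl : (PySem.Str.strip raw).toList = PySem.Chars.strip raw.toList :=
    PySem.Str.toList_strip raw
  by_cases he : PySem.Str.strip raw = ""
  · have h0 : tokenizeAux [] raw.toList = [] := by
      rw [← tokenize_strip, ← htl, he]; rfl
    simp [he, h0, parseTokens]
  · simp only [he, if_false]
    rw [htl, tokenize_strip]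
    by_cases hn : ((tokenizeAux [] raw.toList).any isNumTok) = false
    · simp [hn, parseTokens_no_num _ hn]
    · simp [hn]

lemma stepB_eq (out : List (Int × Int)) (raw : String) :
    scanAux (out, none, false) none raw.toList =
      out ++ parseTokens (tokenizeAux [] raw.toList) := by
  have h := scanAux_eq_runToks raw.toList [] (out, none, false)
  simp only [optOf, List.isEmpty_nil, if_true] at h
  rw [h]
  exact (runToks_eq_parseTokens (tokenizeAux [] raw.toList) out).1

lemma foldl_fun_congr {α β : Type} (f g : β → α → β) (l : List α)
    (h : ∀ b a, f b a = g b a) : ∀ acc, l.foldl f acc = l.foldl g acc := by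
  induction l with
  | nil => intro acc; rfl
  | cons a t ih => intro acc; simp only [List.foldl_cons, h acc a, ih]

-- ===== VERDICT (by name: the statement is the Claim_ definition above) =====
theorem parse_catalog_number_ranges_py_spec : Claim_equal_parse_catalog_number_ranges_py := by
  intro entries _ _
  unfold Spec_parse_catalog_number_ranges_py
  unfold parse_catalog_number_ranges_py parse_catalog_number_ranges_py_alt
  refine foldl_fun_congr _ _ entries (fun b a => ?_) []
  rw [stepA_eq b a, stepB_eq b a]
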